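-- pv_equiv track=rewrite | github.com/qavk/steganography-in-text-files | stegano.py | prepare_blocks
-- ===== SOURCE A (Python) =====
-- def prepare_blocks(message):
--     """Разбиение секретного сообщения на блоки"""
--     blocks = []
--     step = 16
--
--     if len(message) % 16 == 0:
--         blocks_count = len(message) // 16
--         for i in range(blocks_count):
--             block = message[i*16:step]
--             step += 16
--             blocks.append(block)
--         last_block = chr(128) + "0" * 15
--         blocks.append(last_block)
--     else:
--         blocks_count = len(message) // 16 + 1
--         for i in range(blocks_count-1):
--             block = message[i*16:step]
--             step += 16
--             blocks.append(block)
--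
--         last_block_count = 16 - (blocks_count * 16 - len(message))
--         last_block = message[(blocks_count-1) * 16: (blocks_count-1) * 16 + last_block_count] + \
--             chr(128) + "0" * (blocks_count * 16 - len(message) - 1)
--         blocks.append(last_block)
--
--     for i in range(len(blocks)):
--         blocks[i] = sum([ord(c) << (8 * x) for x, c in enumerate(reversed(blocks[i]))])
--     return blocks
-- ===== SOURCE B (Python) =====
-- def prepare_blocks(message):
--     """Split the message into 16-char blocks encoded as base-256 integers."""
--     target = (len(message) // 16 + 1) * 16
--     padded = message + chr(128) + "0" * (target - len(message) - 1)
--     blocks = []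
--     for i in range(0, target, 16):
--         n = 0
--         for c in padded[i:i + 16]:
--             n = n * 256 + ord(c)
--         blocks.append(n)
--     return blocks
-- ===== Notes on version B (the rewrite author's own statement) =====
-- stated objective: simpler
-- what changed: B pads the message to the next strict multiple of 16 up front and slices it into uniform 16-char chunks in one loop, encoding each chunk by Horner's rule (n = n*256 + ord(c)) instead of A's two-branch block construction with a running step counter and a separate reversed enumerate/shift-sum encoding pass.
import Mathlib
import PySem

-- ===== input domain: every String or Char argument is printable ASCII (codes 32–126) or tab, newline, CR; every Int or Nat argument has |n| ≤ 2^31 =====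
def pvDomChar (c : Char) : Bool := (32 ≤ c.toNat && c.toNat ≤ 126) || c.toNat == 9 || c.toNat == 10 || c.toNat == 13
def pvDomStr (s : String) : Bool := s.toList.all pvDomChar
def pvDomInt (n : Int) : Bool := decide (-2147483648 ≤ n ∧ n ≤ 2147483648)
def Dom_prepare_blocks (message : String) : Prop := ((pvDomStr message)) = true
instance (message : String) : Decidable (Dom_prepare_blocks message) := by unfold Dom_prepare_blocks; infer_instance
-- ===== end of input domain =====

-- B pads the message up front and slices it into uniform 16-char chunks encoded by
-- Horner's rule, replacing A's two-branch block building, step counter and shift-sum pass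
-- (objective: simpler).

-- ===== PORT A =====
-- sum([ord(c) << (8 * x) for x, c in enumerate(reversed(block))])
def pbEncode (b : List Char) : Int :=
  ((PySem.List.enumerate b.reverse 0).map
    (fun xc => (xc.2.toNat : Int) * 2 ^ (8 * xc.1).toNat)).sum

def prepare_blocks (message : String) : List Int :=
  let chars := message.toList
  let n : Int := chars.length
  let blocks : List (List Char) :=
    if n % 16 = 0 then
      let blocks_count := PySem.Int.floordiv n 16
      let loop := (PySem.List.pyRange 0 blocks_count 1).foldl
        (fun (st : Int × List (List Char)) i =>
          (st.1 + 16, st.2 ++ [PySem.List.slice chars (some (i * 16)) (some st.1)]))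
        (16, [])
      loop.2 ++ [Char.ofNat 128 :: List.replicate 15 '0']
    else
      let blocks_count := PySem.Int.floordiv n 16 + 1
      let loop := (PySem.List.pyRange 0 (blocks_count - 1) 1).foldl
        (fun (st : Int × List (List Char)) i =>
          (st.1 + 16, st.2 ++ [PySem.List.slice chars (some (i * 16)) (some st.1)]))
        (16, [])
      let last_block_count := 16 - (blocks_count * 16 - n)
      let last_block :=
        PySem.List.slice chars (some ((blocks_count - 1) * 16))
          (some ((blocks_count - 1) * 16 + last_block_count)) ++
        Char.ofNat 128 :: List.replicate (blocks_count * 16 - n - 1).toNat '0'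
      loop.2 ++ [last_block]
  blocks.map pbEncode

-- ===== PORT B =====
def prepare_blocks_alt (message : String) : List Int :=
  let chars := message.toList
  let target : Int := (PySem.Int.floordiv chars.length 16 + 1) * 16
  let padded := chars ++ Char.ofNat 128 :: List.replicate (target - chars.length - 1).toNat '0'
  (PySem.List.pyRange 0 target 16).foldl
    (fun bs i =>
      bs ++ [(PySem.List.slice padded (some i) (some (i + 16))).foldl
               (fun n c => n * 256 + (c.toNat : Int)) 0]) []

-- ===== PRECONDITION & SPEC =====
def Spec_prepare_blocks (message : String) (out : List Int) : Prop := out = prepare_blocks_alt message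
instance (message : String) (out : List Int) : Decidable (Spec_prepare_blocks message out) := by unfold Spec_prepare_blocks; infer_instance

-- ===== CLAIM (what is proved, stated in full; the proofs are below) =====
def Claim_equal_prepare_blocks : Prop := ∀ (message : String), Dom_prepare_blocks message → Spec_prepare_blocks message (prepare_blocks message)

-- ===== LEMMAS AND PROOFS =====
theorem pbEncode_nil : pbEncode [] = 0 := rfl

theorem pbEncode_cons (c : Char) (t : List Char) :
    pbEncode (c :: t) = pbEncode t + (c.toNat : Int) * 256 ^ t.length := by
  unfold pbEncode
  rw [List.reverse_cons, PySem.List.enumerate_append]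
  simp [PySem.List.enumerate]
  have : (8 * (t.length : Int)).toNat = 8 * t.length := by omega
  rw [this, pow_mul]
  norm_num

theorem horner_eq (b : List Char) (a : Int) :
    b.foldl (fun n c => n * 256 + (c.toNat : Int)) a = a * 256 ^ b.length + pbEncode b := by
  induction b generalizing a with
  | nil => simp [pbEncode_nil]
  | cons c t ih =>
      simp only [List.foldl_cons, ih, pbEncode_cons, List.length_cons]
      ring

theorem foldl_append_singleton {α β : Type} (l : List α) (f : α → β) (acc : List β) :
    l.foldl (fun bs i => bs ++ [f i]) acc = acc ++ l.map f := by
  induction l generalizing acc with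
  | nil => simp
  | cons x t ih => simp [ih]

theorem slice_chunk (m : List Char) (k : ℕ) :
    PySem.List.slice m (some ((k:Int) * 16)) (some (16 * (k:Int) + 16)) = (m.drop (16*k)).take 16 := by
  have h := PySem.List.slice_natCast_add m (16*k) 16
  push_cast at h
  rw [mul_comm ((k:Int)) 16]
  exact h

theorem blocksA_loop (m : List Char) (k : ℕ) :
    (PySem.List.pyRange 0 (k:Int) 1).foldl
      (fun (st : Int × List (List Char)) i =>
        (st.1 + 16, st.2 ++ [PySem.List.slice m (some (i * 16)) (some st.1)]))
      (16, [])
    = (16*(k:Int)+16, (List.range k).map (fun j => (m.drop (16*j)).take 16)) := by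
  induction k with
  | zero => simp [PySem.List.pyRange_one_eq_nil]
  | succ k ih =>
      have hc : ((k+1:ℕ):Int) = (k:Int) + 1 := by push_cast; ring
      rw [hc, PySem.List.pyRange_one_succ_right (by positivity), List.foldl_append, ih]
      simp only [List.foldl_cons, List.foldl_nil]
      rw [slice_chunk, List.range_succ, List.map_append]
      refine Prod.ext ?_ ?_
      · show 16*(k:Int)+16+16 = _
        push_cast; ring
      · simp

theorem floordiv_natCast16 (L : ℕ) : PySem.Int.floordiv (L:Int) 16 = ((L/16:ℕ):Int) := by
  simp [PySem.Int.floordiv, Int.fdiv_eq_ediv]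

theorem pyRange16 (K : ℕ) (hK : 1 ≤ K) :
    PySem.List.pyRange 0 (16*(K:Int)) 16 = (List.range K).map (fun k : ℕ => 16*(k:Int)) := by
  rw [PySem.List.pyRange_of_pos _ _ (by norm_num : (0:Int) < 16)]
  rw [if_pos (by positivity : (0:Int) < 16*(K:Int))]
  have h2 : ((16*(K:Int) - 0 + 16 - 1)/16).toNat = K := by omega
  rw [h2]
  simp only [zero_add]

theorem slice_chunk' (m : List Char) (k : ℕ) :
    PySem.List.slice m (some (16 * (k:Int))) (some (16 * (k:Int) + 16)) = (m.drop (16*k)).take 16 := by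
  have h := PySem.List.slice_natCast_add m (16*k) 16
  push_cast at h
  exact h

theorem alt_eq (message : String) :
    prepare_blocks_alt message =
      (List.range (message.toList.length/16 + 1)).map
        (fun k => pbEncode (((message.toList ++ Char.ofNat 128 ::
           List.replicate (16*(message.toList.length/16+1) - message.toList.length - 1) '0').drop (16*k)).take 16)) := by
  unfold prepare_blocks_alt
  dsimp only
  set m := message.toList with hm
  set L := m.length with hLdef
  rw [floordiv_natCast16]
  have htarget : (((L/16:ℕ):Int) + 1) * 16 = 16 * ((L/16 + 1 : ℕ):Int) := by push_cast; ring
  have hP : (16 * ((L/16 + 1 : ℕ):Int) - (L:Int) - 1).toNat = 16*(L/16+1) - L - 1 := by omega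
  rw [htarget, hP, pyRange16 _ (by omega), foldl_append_singleton, List.map_map]
  apply List.map_congr_left
  intro k _
  simp only [Function.comp]
  rw [slice_chunk', horner_eq]
  simp [pbEncode]

theorem chunk_in (u v : List Char) (j : ℕ) (h : 16*j + 16 ≤ u.length) :
    ((u ++ v).drop (16*j)).take 16 = (u.drop (16*j)).take 16 := by
  rw [List.drop_append, List.take_append]
  have h1 : 16 - (u.drop (16*j)).length = 0 := by simp; omega
  have h2 : 16*j - u.length = 0 := by omega
  simp [h2]
  exact Or.inl (by omega)

theorem chunk_last (u v : List Char) (q : ℕ) (h1 : 16*q ≤ u.length)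
    (h2 : (u.length - 16*q) + v.length = 16) :
    ((u ++ v).drop (16*q)).take 16 = u.drop (16*q) ++ v := by
  rw [List.drop_append]
  have h3 : 16*q - u.length = 0 := by omega
  rw [h3, List.drop_zero]
  apply List.take_of_length_le
  simp
  omega

theorem a_eq (message : String) :
    prepare_blocks message =
      ((List.range (message.toList.length/16)).map
          (fun j : ℕ => (message.toList.drop (16*j)).take 16)
        ++ [message.toList.drop (16*(message.toList.length/16)) ++ Char.ofNat 128 ::
            List.replicate (16*(message.toList.length/16+1) - message.toList.length - 1) '0']).map
        pbEncode := by
  unfold prepare_blocks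
  dsimp only
  set m := message.toList with hm
  set L := m.length with hLdef
  set q := L / 16 with hq
  rw [floordiv_natCast16]
  by_cases h : ((L:Int)) % 16 = 0
  · rw [if_pos h, blocksA_loop]
    have hL16 : L = 16 * q := by omega
    have hdrop : m.drop (16*q) = [] := by
      apply List.drop_eq_nil_of_le; omega
    have hrep : 16*(q+1) - L - 1 = 15 := by omega
    rw [hdrop, hrep]
    simp
    rfl
  · rw [if_neg h]
    have e0 : ((q:Int) + 1 - 1) = (q:Int) := by ring
    rw [e0, blocksA_loop]
    set r := L - 16*q with hr
    have e2 : (q:Int)*16 + (16 - (((q:Int)+1)*16 - (L:Int))) = ((16*q:ℕ):Int) + ((r:ℕ):Int) := by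
      have : ¬ (L % 16 = 0) := by omega
      push_cast
      omega
    have e1 : ((q:Int))*16 = ((16*q:ℕ):Int) := by push_cast; ring
    rw [e2, e1, PySem.List.slice_natCast_add]
    have htake : (List.drop (16*q) m).take r = List.drop (16*q) m := by
      apply List.take_of_length_le; simp; omega
    have hrep : (((q:Int)+1)*16 - (L:Int) - 1).toNat = 16*(q+1) - L - 1 := by
      have : ¬ (L % 16 = 0) := by omega
      omega
    rw [htake, hrep]

theorem main_eq (message : String) : prepare_blocks message = prepare_blocks_alt message := by
  rw [a_eq, alt_eq]
  set m := message.toList with hm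
  set L := m.length with hLdef
  set q := L / 16 with hq
  set p := Char.ofNat 128 :: List.replicate (16*(q+1) - L - 1) '0' with hp
  rw [List.range_succ, List.map_append, List.map_append]
  congr 1
  · rw [List.map_map]
    apply List.map_congr_left
    intro j hj
    rw [List.mem_range] at hj
    simp only [Function.comp]
    rw [chunk_in m p j (by omega)]
  · simp only [List.map_cons, List.map_nil]
    rw [chunk_last m p q (by omega) (by simp [hp]; omega)]

-- ===== VERDICT (by name: the statement is the Claim_ definition above) =====
theorem prepare_blocks_spec : Claim_equal_prepare_blocks := by
  intro message _
  unfold Spec_prepare_blocks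
  exact main_eq message
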